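-- pv_equiv track=rewrite | github.com/salmaanhaniif/AI_DoE_Un-Supervised_Learning | src/supervised_learning/KNN.py | getMostCommonLabel
-- ===== SOURCE A (Python) =====
-- def getMostCommonLabel(labels):
--     # most common = modus
--     labelCounts = {}
--     for label in labels:
--         if label in labelCounts:
--             labelCounts[label] += 1
--         else:
--             labelCounts[label] = 1
--
--     mostCommonLabel = None
--     maxCount = 0
--     for label, count in labelCounts.items():
--         if count > maxCount:
--             maxCount = count
--             mostCommonLabel = label
--
--     return mostCommonLabel
-- ===== SOURCE B (Python) =====
-- def getMostCommonLabel(labels):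
--     # count once, then rank labels by descending count with a stable sort;
--     # stability keeps the first-inserted label in front on ties
--     counts = {}
--     for label in labels:
--         counts[label] = counts.get(label, 0) + 1
--     ranked = sorted(counts, key=counts.get, reverse=True)
--     return ranked[0] if ranked else None
-- ===== Notes on version B (the rewrite author's own statement) =====
-- stated objective: alternative
-- what changed: Replaces A's membership-tested counting loop and explicit strict-greater max scan by a get-default counting pass followed by a stable reverse sort of the labels by count, taking the head.
import Mathlib
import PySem

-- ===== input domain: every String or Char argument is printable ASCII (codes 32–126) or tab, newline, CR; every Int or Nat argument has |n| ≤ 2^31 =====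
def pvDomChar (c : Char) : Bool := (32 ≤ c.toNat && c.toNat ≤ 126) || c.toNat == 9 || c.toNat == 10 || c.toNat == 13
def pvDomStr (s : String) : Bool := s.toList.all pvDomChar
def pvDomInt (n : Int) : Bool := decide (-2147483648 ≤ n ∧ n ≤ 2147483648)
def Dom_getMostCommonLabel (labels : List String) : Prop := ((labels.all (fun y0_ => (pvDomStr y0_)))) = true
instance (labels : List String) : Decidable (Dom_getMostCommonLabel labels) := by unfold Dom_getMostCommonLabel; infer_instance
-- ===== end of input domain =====

-- B replaces A's membership-tested counting loop + strict-greater max scan by a get-default counting pass, a stable reverse sort by count, and taking the head (alternative decomposition, similar cost).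


-- ===== PORT A =====
def getMostCommonLabel (labels : List String) : Option String :=
  let labelCounts : PySem.Dict String Int :=
    labels.foldl (fun d label =>
      if d.contains label then d.insert label (d.getD label 0 + 1)
      else d.insert label 1) PySem.Dict.empty
  let r : Option String × Int :=
    labelCounts.items.foldl (fun st p =>
      if p.2 > st.2 then (some p.1, p.2) else st) (none, 0)
  r.1

-- ===== PORT B =====
def getMostCommonLabel_alt (labels : List String) : Option String :=
  let counts : PySem.Dict String Int :=
    labels.foldl (fun d label => d.insert label (d.getD label 0 + 1)) PySem.Dict.empty
  let ranked := PySem.List.sorted counts.keys (fun l => counts.getD l 0) true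
  ranked.head?

-- ===== PRECONDITION & SPEC =====
def Spec_getMostCommonLabel (labels : List String) (out : Option String) : Prop := out = getMostCommonLabel_alt labels
instance (labels : List String) (out : Option String) : Decidable (Spec_getMostCommonLabel labels out) := by unfold Spec_getMostCommonLabel; infer_instance

-- ===== CLAIM (what is proved, stated in full; the proofs are below) =====
def Claim_equal_getMostCommonLabel : Prop := ∀ (labels : List String), Dom_getMostCommonLabel labels → Spec_getMostCommonLabel labels (getMostCommonLabel labels)

-- ===== LEMMAS AND PROOFS =====

-- A's counting loop builds exactly Counter(labels): the two branches do the same insert.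
lemma countsLoop_eq_counter (labels : List String) :
    labels.foldl (fun d label =>
      if d.contains label then d.insert label (d.getD label 0 + 1)
      else d.insert label 1) PySem.Dict.empty = PySem.Dict.counter labels := by
  rw [← PySem.Dict.foldl_insert_getD_add_one_eq_counter]
  apply PySem.List.foldl_congr_mem
  intro d x _
  by_cases h : d.contains x
  · simp [h]
  · have h0 : d.getD x 0 = 0 := PySem.Dict.getD_of_not_contains d 0 (eq_false_of_ne_true h)
    simp [h, h0]

-- Core invariant: inserting elements (all with positive key) one by one into a
-- stable reverse-sorted accumulator keeps its head equal to A's strict-'>' scan state.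
lemma insert_scan_invariant (c : String → Int) (ds : List String)
    (hpos : ∀ x ∈ ds, 0 < c x) (acc : List String) (st : Option String × Int)
    (hinv : (acc = [] ∧ st = (none, 0)) ∨ ∃ m t, acc = m :: t ∧ st = (some m, c m)) :
    (ds.foldl (fun a x => PySem.List.insertBy (fun a b => decide (c b < c a)) x a) acc).head?
      = (ds.foldl (fun st k => if c k > st.2 then (some k, c k) else st) st).1 := by
  induction ds generalizing acc st with
  | nil =>
    rcases hinv with ⟨ha, hs⟩ | ⟨m, t, ha, hs⟩ <;> simp [ha, hs]
  | cons x xs ih =>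
    have hx : 0 < c x := hpos x (by simp)
    simp only [List.foldl_cons]
    apply ih (fun y hy => hpos y (by simp [hy]))
    rcases hinv with ⟨ha, hs⟩ | ⟨m, t, ha, hs⟩
    · subst ha; subst hs
      right
      exact ⟨x, [], by simp [PySem.List.insertBy], by simp [hx]⟩
    · subst ha; subst hs
      by_cases hlt : c m < c x
      · right
        refine ⟨x, m :: t, ?_, ?_⟩
        · simp [PySem.List.insertBy, hlt]
        · simp [gt_iff_lt, hlt]
      · right
        refine ⟨m, PySem.List.insertBy (fun a b => decide (c b < c a)) x t, ?_, ?_⟩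
        · simp [PySem.List.insertBy, hlt]
        · simp [gt_iff_lt, hlt]

-- head of the stable reverse sort = result of A's strict-'>' max scan (positive keys).
lemma head_sorted_rev_eq_scan (c : String → Int) (ds : List String)
    (hpos : ∀ x ∈ ds, 0 < c x) :
    (PySem.List.sorted ds c true).head?
      = (ds.foldl (fun st k => if c k > st.2 then (some k, c k) else st)
          ((none : Option String), (0 : Int))).1 := by
  rw [PySem.List.sorted_rev_eq_foldl_insertBy]
  exact insert_scan_invariant c ds hpos [] (none, 0) (Or.inl ⟨rfl, rfl⟩)

-- ===== VERDICT (by name: the statement is the Claim_ definition above) =====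
theorem getMostCommonLabel_spec : Claim_equal_getMostCommonLabel := by
  intro labels _
  unfold Spec_getMostCommonLabel getMostCommonLabel getMostCommonLabel_alt
  simp only [countsLoop_eq_counter, PySem.Dict.foldl_insert_getD_add_one_eq_counter,
    PySem.Dict.items_counter, PySem.Dict.keys_counter, List.foldl_map]
  have hc : (fun l => (PySem.Dict.counter labels).getD l 0) = fun l => ((List.count l labels : Int)) :=
    funext fun l => by rw [PySem.Dict.getD_counter]
  rw [hc, head_sorted_rev_eq_scan]
  intro x hx
  have hmem : x ∈ labels := (PySem.Set.mem_ofList labels x).mp hx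
  exact_mod_cast List.count_pos_iff.mpr hmem
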